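-- pv_equiv track=rewrite | github.com/szapp/listvars | listvars.py | verifyfields
-- ===== SOURCE A (Python) =====
-- labels = [
--     'name',
--     'type',
--     'size',
--     'value',
-- ]
--
-- def verifyfields(fields):
--     """
--     Verfiy the field labels
--     """
--     # Remove invalid fields
--     fields = [label.title() for label in fields if label.lower() in labels]
--
--     # Make sure name always exists and is in the first column
--     fields = ['Name'] + fields
--
--     # Each field is unique, set() changes order!
--     fields_unique = []
--     for i in fields:
--         if i not in fields_unique:
--             fields_unique.append(i)
--     fields = fields_unique
--
--     return fields
-- ===== SOURCE B (Python) =====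
-- labels = [
--     'name',
--     'type',
--     'size',
--     'value',
-- ]
--
-- def verifyfields(fields):
--     """
--     Verify the field labels.
--
--     Instead of filtering/title-casing/deduplicating the input, iterate over
--     the fixed vocabulary labels[1:]: find each label's first occurrence in
--     the lowered input, sort those positions, and title-case the fields found
--     there.  'Name' is always the first column; a 'name' field collapses into
--     it automatically because 'name' is not in labels[1:].
--     """
--     lowers = [f.lower() for f in fields]
--     firsts = sorted(lowers.index(lab) for lab in labels[1:] if lab in lowers)
--     return ['Name'] + [fields[i].title() for i in firsts]
-- ===== Notes on version B (the rewrite author's own statement) =====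
-- stated objective: alternative
-- what changed: Instead of A's filter+title pass over the input, a prepend, and a membership-scan dedup pass, B never deduplicates: it iterates over the fixed label vocabulary, takes each label's first-occurrence index in the lowered input, sorts those indices, and titles the fields found there.
import Mathlib
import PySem

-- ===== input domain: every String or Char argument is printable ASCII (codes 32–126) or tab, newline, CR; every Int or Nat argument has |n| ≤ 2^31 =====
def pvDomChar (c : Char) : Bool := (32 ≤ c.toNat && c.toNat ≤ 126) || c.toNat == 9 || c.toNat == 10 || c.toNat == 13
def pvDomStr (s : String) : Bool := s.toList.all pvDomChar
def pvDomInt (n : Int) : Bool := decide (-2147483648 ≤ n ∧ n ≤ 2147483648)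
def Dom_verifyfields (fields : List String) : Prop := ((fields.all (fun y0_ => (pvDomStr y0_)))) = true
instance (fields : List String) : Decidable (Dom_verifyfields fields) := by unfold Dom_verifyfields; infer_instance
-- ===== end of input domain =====

-- B replaces A's three passes over the input (filter+title, prepend, dedup scan) by iterating
-- the fixed label vocabulary: each label's first-occurrence index, sorted, then titled.

-- ===== PORT A =====
def pvLabels : List String := ["name", "type", "size", "value"]

-- hand port of str.title(): exact on ASCII (cased chars = ASCII letters; a letter after a
-- non-letter is uppercased, a letter after a letter is lowercased)
def pyTitleChars : Bool → List Char → List Char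
  | _, [] => []
  | prev, c :: cs =>
    if PySem.Chars.isalpha c then
      (if prev then PySem.Chars.lowerChar c else PySem.Chars.upperChar c) :: pyTitleChars true cs
    else
      c :: pyTitleChars false cs

def pyTitle (s : String) : String := String.ofList (pyTitleChars false s.toList)

def verifyfields (fields : List String) : List String :=
  -- fields = [label.title() for label in fields if label.lower() in labels]
  let fields1 := (fields.filter (fun label => pvLabels.contains (PySem.Str.lower label))).map pyTitle
  -- fields = ['Name'] + fields
  let fields2 := "Name" :: fields1
  -- dedup loop keeping first occurrences
  let fieldsUnique := fields2.foldl (fun acc i => if acc.contains i then acc else acc ++ [i]) []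
  fieldsUnique

-- ===== PORT B =====
def verifyfields_alt (fields : List String) : List String :=
  -- lowers = [f.lower() for f in fields]
  let lowers := fields.map PySem.Str.lower
  -- firsts = sorted(lowers.index(lab) for lab in labels[1:] if lab in lowers)
  -- (labels[1:] = drop 1; lowers.index is guarded by 'lab in lowers', so the getD 0 is never taken)
  let firsts := PySem.List.sorted
    (((pvLabels.drop 1).filter (fun lab => lowers.contains lab)).map
      (fun lab => (PySem.List.index? lowers lab).getD 0))
    (fun x => x) false
  -- ['Name'] + [fields[i].title() for i in firsts]   (each i is a valid index, so getD is fields[i])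
  "Name" :: firsts.map (fun i => pyTitle (fields.getD i ""))

-- ===== PRECONDITION & SPEC =====
def Spec_verifyfields (fields : List String) (out : List String) : Prop := out = verifyfields_alt fields
instance (fields : List String) (out : List String) : Decidable (Spec_verifyfields fields out) := by unfold Spec_verifyfields; infer_instance

-- ===== CLAIM (what is proved, stated in full; the proofs are below) =====
def Claim_equal_verifyfields : Prop := ∀ (fields : List String), Dom_verifyfields fields → Spec_verifyfields fields (verifyfields fields)

-- ===== LEMMAS AND PROOFS =====
theorem pvCharToNat_le {c d : Char} (h : c ≤ d) : c.toNat ≤ d.toNat := by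
  simpa [Char.le_def, UInt32.le_iff_toNat_le] using h

theorem pvCharEq {c d : Char} (h : c.toNat = d.toNat) : c = d := by
  unfold Char.toNat at h
  exact Char.ext (UInt32.toNat_inj.mp h)

theorem pvChar_pin (c l : Char) (h : PySem.Chars.lowerChar c = l)
    (hl : PySem.Chars.islower l = true) :
    PySem.Chars.isalpha c = true ∧ PySem.Chars.upperChar c = Char.ofNat (l.toNat - 32) := by
  have hl' : 97 ≤ l.toNat ∧ l.toNat ≤ 122 := by
    simp only [PySem.Chars.islower, Bool.and_eq_true, decide_eq_true_eq] at hl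
    exact ⟨pvCharToNat_le hl.1, pvCharToNat_le hl.2⟩
  unfold PySem.Chars.lowerChar at h
  split at h
  · rename_i hup
    simp only [PySem.Chars.isupper, Bool.and_eq_true, decide_eq_true_eq] at hup
    have hup' : 65 ≤ c.toNat ∧ c.toNat ≤ 90 := ⟨pvCharToNat_le hup.1, pvCharToNat_le hup.2⟩
    have hv : (c.toNat + 32).isValidChar := Or.inl (by omega)
    have htn : l.toNat = c.toNat + 32 := by
      rw [← h, Char.toNat_ofNat, if_pos hv]
    have hv2 : (l.toNat - 32).isValidChar := Or.inl (by omega)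
    refine ⟨?_, ?_⟩
    · simp [PySem.Chars.isalpha, PySem.Chars.isupper, hup.1, hup.2]
    · have hlo : PySem.Chars.islower c = false := by
        simp only [PySem.Chars.islower, Bool.and_eq_false_iff]
        left
        simp only [decide_eq_false_iff_not]
        intro hcon
        have := pvCharToNat_le hcon
        have h97 : 'a'.toNat = 97 := rfl
        omega
      unfold PySem.Chars.upperChar
      rw [hlo, if_neg Bool.false_ne_true]
      apply pvCharEq
      rw [Char.toNat_ofNat, if_pos hv2]
      omega
  · subst h
    refine ⟨by simp [PySem.Chars.isalpha, hl], ?_⟩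
    unfold PySem.Chars.upperChar
    rw [hl]
    simp

def capWord : List Char → List Char
  | [] => []
  | l :: ls => Char.ofNat (l.toNat - 32) :: ls
def capWordStr (s : String) : String := String.ofList (capWord s.toList)

theorem pvTitleChars_of_lower (cs : List Char) : ∀ ls, PySem.Chars.lower cs = ls →
    (∀ l ∈ ls, PySem.Chars.islower l = true) →
    pyTitleChars false cs = capWord ls ∧ pyTitleChars true cs = ls := by
  induction cs with
  | nil => intro ls h _; simp [PySem.Chars.lower] at h; subst h; exact ⟨rfl, rfl⟩
  | cons c cs ih =>
    intro ls h hls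
    simp only [PySem.Chars.lower, List.map_cons] at h
    subst h
    have hl := hls _ (List.mem_cons_self ..)
    obtain ⟨ha, hu⟩ := pvChar_pin c _ rfl hl
    have htail := ih (PySem.Chars.lower cs) rfl (fun l hm => hls l (List.mem_cons_of_mem _ (by simpa [PySem.Chars.lower] using hm)))
    constructor
    · simp [pyTitleChars, ha, hu, htail.2, capWord, PySem.Chars.lower]
    · simp [pyTitleChars, ha, htail.2, PySem.Chars.lower]

theorem pvTitle_of_lower (f lab : String) (h : PySem.Str.lower f = lab)
    (hlab : ∀ l ∈ lab.toList, PySem.Chars.islower l = true) :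
    pyTitle f = capWordStr lab := by
  have h' : PySem.Chars.lower f.toList = lab.toList := by
    rw [← h]; simp [PySem.Str.lower]
  unfold pyTitle capWordStr
  rw [(pvTitleChars_of_lower f.toList lab.toList h' hlab).1]

def pvL : List String := ["type", "size", "value"]
def pvSeq : List String → List String → List String
  | [], _ => []
  | f :: fs, P =>
    if PySem.Str.lower f ∈ P then
      PySem.Str.lower f :: pvSeq fs (P.erase (PySem.Str.lower f))
    else pvSeq fs P

-- capWordStr is injective on pvL ∪ {"name"} and never "Name"-colliding: finite decides
theorem pvCap_inj : ∀ lab ∈ pvL, ∀ lab' ∈ pvL, (capWordStr lab = capWordStr lab' ↔ lab = lab') := by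
  intro lab hlab lab' hlab'
  simp only [pvL, List.mem_cons, List.not_mem_nil, or_false] at hlab hlab'
  rcases hlab with rfl|rfl|rfl <;> rcases hlab' with rfl|rfl|rfl <;>
    simp [capWordStr, capWord]
theorem pvCap_ne_name : ∀ lab ∈ pvL, capWordStr lab ≠ "Name" := by
  intro lab hlab
  simp only [pvL, List.mem_cons, List.not_mem_nil, or_false] at hlab
  rcases hlab with rfl|rfl|rfl <;> simp [capWordStr, capWord]

theorem pvLowerIsLower : ∀ lab ∈ pvLabels, ∀ l ∈ lab.toList, PySem.Chars.islower l = true := by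
  intro lab hlab
  simp only [pvLabels, List.mem_cons, List.not_mem_nil, or_false] at hlab
  have step : ∀ (cs : List Char) (lab : String), lab.toList = cs →
      (∀ l ∈ cs, PySem.Chars.islower l = true) → ∀ l ∈ lab.toList, PySem.Chars.islower l = true := by
    intro cs lab h hall; rw [h]; exact hall
  rcases hlab with rfl|rfl|rfl|rfl
  · exact step ['n','a','m','e'] _ rfl (by
      intro l hl; simp only [List.mem_cons, List.not_mem_nil, or_false] at hl
      rcases hl with rfl|rfl|rfl|rfl <;> decide)
  · exact step ['t','y','p','e'] _ rfl (by
      intro l hl; simp only [List.mem_cons, List.not_mem_nil, or_false] at hl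
      rcases hl with rfl|rfl|rfl|rfl <;> decide)
  · exact step ['s','i','z','e'] _ rfl (by
      intro l hl; simp only [List.mem_cons, List.not_mem_nil, or_false] at hl
      rcases hl with rfl|rfl|rfl|rfl <;> decide)
  · exact step ['v','a','l','u','e'] _ rfl (by
      intro l hl; simp only [List.mem_cons, List.not_mem_nil, or_false] at hl
      rcases hl with rfl|rfl|rfl|rfl|rfl <;> decide)

theorem pvFoldA (fs : List String) : ∀ (acc P : List String), P.Nodup →
    (∀ lab ∈ P, lab ∈ pvL) → "Name" ∈ acc →
    (∀ lab ∈ pvL, (capWordStr lab ∈ acc ↔ lab ∉ P)) →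
    ((fs.filter (fun f => pvLabels.contains (PySem.Str.lower f))).map pyTitle).foldl
        (fun acc i => if acc.contains i then acc else acc ++ [i]) acc
      = acc ++ (pvSeq fs P).map capWordStr := by
  induction fs with
  | nil => intro acc P _ _ _ _; simp [pvSeq]
  | cons f fs ih =>
    intro acc P hnd hsub hname hinv
    by_cases hf : PySem.Str.lower f ∈ pvLabels
    · rw [List.filter_cons_of_pos (by simpa using hf)]
      have hcap : pyTitle f = capWordStr (PySem.Str.lower f) :=
        pvTitle_of_lower f _ rfl (pvLowerIsLower _ hf)
      by_cases hP : PySem.Str.lower f ∈ P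
      · -- new label appended
        have hmem : PySem.Str.lower f ∈ pvL := hsub _ hP
        have hnotacc : capWordStr (PySem.Str.lower f) ∉ acc := by
          rw [hinv _ hmem]; simp [hP]
        rw [List.map_cons, List.foldl_cons, hcap,
          if_neg (by simpa [List.contains_iff_mem] using hnotacc)]
        rw [ih (acc ++ [capWordStr (PySem.Str.lower f)]) (P.erase (PySem.Str.lower f))
          (hnd.erase _) (fun lab h => hsub _ (List.erase_subset h))
          (by simp [hname])
          (fun lab hlab => by
            rw [List.mem_append, List.mem_singleton, hnd.mem_erase_iff]
            rw [pvCap_inj _ hlab _ hmem]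
            constructor
            · rintro (h1 | h2)
              · intro hc; exact ((hinv _ hlab).1 h1) hc.2
              · subst h2; simp
            · intro h
              by_cases he : lab = PySem.Str.lower f
              · right; exact he
              · left; rw [hinv _ hlab]; intro hc; exact h ⟨he, hc⟩)]
        simp [pvSeq, hP]
      · -- already-seen label (or impossible)
        have : capWordStr (PySem.Str.lower f) ∈ acc ∨ PySem.Str.lower f = "name" := by
          by_cases hmem : PySem.Str.lower f ∈ pvL
          · left; rw [hinv _ hmem]; exact hP
          · right
            revert hf hmem; unfold pvLabels pvL; intro hf hmem
            simp at hf hmem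
            tauto
        have hin : pyTitle f ∈ acc := by
          rcases this with h1 | h2
          · rw [hcap]; exact h1
          · rw [hcap, h2]
            have : capWordStr "name" = "Name" := by rfl
            rw [this]; exact hname
        rw [List.map_cons, List.foldl_cons, if_pos (by simpa [List.contains_iff_mem] using hin)]
        rw [ih acc P hnd hsub hname hinv]
        simp [pvSeq, hP]
    · rw [List.filter_cons_of_neg (by simpa using hf)]
      have hP : PySem.Str.lower f ∉ P := fun hc => hf (by
        have := hsub _ hc; revert this; unfold pvL pvLabels; intro h; simp at h ⊢; tauto)
      rw [ih acc P hnd hsub hname hinv]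
      simp [pvSeq, hP]

theorem pvSeq_mem (fs : List String) : ∀ P, P.Nodup → ∀ lab,
    (lab ∈ pvSeq fs P ↔ lab ∈ P ∧ lab ∈ fs.map PySem.Str.lower) := by
  induction fs with
  | nil => intro P _ lab; simp [pvSeq]
  | cons f fs ih =>
    intro P hnd lab
    simp only [pvSeq, List.map_cons, List.mem_cons]
    by_cases hx : PySem.Str.lower f ∈ P
    · rw [if_pos hx]
      simp only [List.mem_cons, ih _ (hnd.erase _), hnd.mem_erase_iff]
      constructor
      · rintro (rfl | ⟨⟨hne, hP⟩, hm⟩)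
        · exact ⟨hx, Or.inl rfl⟩
        · exact ⟨hP, Or.inr hm⟩
      · rintro ⟨hP, rfl | hm⟩
        · exact Or.inl rfl
        · by_cases he : lab = PySem.Str.lower f
          · exact Or.inl he
          · exact Or.inr ⟨⟨he, hP⟩, hm⟩
    · rw [if_neg hx]
      rw [ih _ hnd]
      constructor
      · rintro ⟨hP, hm⟩; exact ⟨hP, Or.inr hm⟩
      · rintro ⟨hP, rfl | hm⟩
        · exact absurd hP hx
        · exact ⟨hP, hm⟩

theorem pvSeq_nodup (fs : List String) : ∀ P, P.Nodup → (pvSeq fs P).Nodup := by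
  induction fs with
  | nil => intro P _; simp [pvSeq]
  | cons f fs ih =>
    intro P hnd
    simp only [pvSeq]
    by_cases hx : PySem.Str.lower f ∈ P
    · rw [if_pos hx]
      refine List.nodup_cons.mpr ⟨?_, ih _ (hnd.erase _)⟩
      intro hc
      have := ((pvSeq_mem fs _ (hnd.erase _) _).1 hc).1
      exact ((hnd.mem_erase_iff).1 this).1 rfl
    · rw [if_neg hx]; exact ih _ hnd

-- cons-shift of the guarded first-occurrence index
theorem pvIdx_cons {L : List String} {x lab : String} (hne : lab ≠ x) (hm : lab ∈ L) :
    (PySem.List.index? (x :: L) lab).getD 0 = (PySem.List.index? L lab).getD 0 + 1 := by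
  obtain ⟨k, hk⟩ := Option.isSome_iff_exists.1 ((PySem.List.index?_isSome_iff L lab).2 hm)
  rw [PySem.List.index?_cons_of_ne L (fun h => hne h.symm), hk]
  rfl

theorem pvSeq_idx_pairwise (fs : List String) : ∀ P, P.Nodup →
    ((pvSeq fs P).map
      (fun lab => (PySem.List.index? (fs.map PySem.Str.lower) lab).getD 0)).Pairwise (· < ·) := by
  induction fs with
  | nil => intro P _; simp [pvSeq]
  | cons f fs ih =>
    intro P hnd
    simp only [pvSeq, List.map_cons]
    by_cases hx : PySem.Str.lower f ∈ P
    · rw [if_pos hx]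
      rw [List.map_cons]
      have hshift : (pvSeq fs (P.erase (PySem.Str.lower f))).map
          (fun lab => (PySem.List.index? (PySem.Str.lower f :: fs.map PySem.Str.lower) lab).getD 0)
        = (pvSeq fs (P.erase (PySem.Str.lower f))).map
          (fun lab => (PySem.List.index? (fs.map PySem.Str.lower) lab).getD 0 + 1) := by
        apply List.map_congr_left
        intro lab hlab
        have hm := (pvSeq_mem fs _ (hnd.erase _) lab).1 hlab
        exact pvIdx_cons ((hnd.mem_erase_iff).1 hm.1).1 hm.2
      rw [hshift]
      refine List.pairwise_cons.mpr ⟨?_, ?_⟩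
      · intro a ha
        simp only [List.mem_map] at ha
        obtain ⟨lab, _, rfl⟩ := ha
        rw [PySem.List.index?_cons_self (PySem.Str.lower f) (fs.map PySem.Str.lower)]
        simp
      · have := ih (P.erase (PySem.Str.lower f)) (hnd.erase _)
        have h2 : ((pvSeq fs (P.erase (PySem.Str.lower f))).map
            (fun lab => (PySem.List.index? (fs.map PySem.Str.lower) lab).getD 0 + 1))
          = ((pvSeq fs (P.erase (PySem.Str.lower f))).map
            (fun lab => (PySem.List.index? (fs.map PySem.Str.lower) lab).getD 0)).map (· + 1) := by
          rw [List.map_map]; rfl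
        rw [h2, List.pairwise_map]
        exact this.imp (by omega)
    · rw [if_neg hx]
      have hshift : (pvSeq fs P).map
          (fun lab => (PySem.List.index? (PySem.Str.lower f :: fs.map PySem.Str.lower) lab).getD 0)
        = (pvSeq fs P).map
          (fun lab => (PySem.List.index? (fs.map PySem.Str.lower) lab).getD 0 + 1) := by
        apply List.map_congr_left
        intro lab hlab
        have hm := (pvSeq_mem fs _ hnd lab).1 hlab
        exact pvIdx_cons (fun h => hx (h ▸ hm.1)) hm.2
      have h2 : (pvSeq fs P).map
          (fun lab => (PySem.List.index? (fs.map PySem.Str.lower) lab).getD 0 + 1)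
        = ((pvSeq fs P).map
          (fun lab => (PySem.List.index? (fs.map PySem.Str.lower) lab).getD 0)).map (· + 1) := by
        rw [List.map_map]; rfl
      rw [hshift, h2, List.pairwise_map]
      exact (ih _ hnd).imp (by omega)


theorem pvL_nodup : pvL.Nodup := by decide

theorem pvL_sub : ∀ lab ∈ pvL, lab ∈ pvLabels := by
  intro lab h
  simp only [pvL, List.mem_cons, List.not_mem_nil, or_false] at h
  rcases h with rfl|rfl|rfl <;> simp [pvLabels]

-- B's sorted first-occurrence indices are exactly pvSeq's indices
theorem pvB_sorted (fields : List String) :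
    PySem.List.sorted
      (((pvLabels.drop 1).filter (fun lab => (fields.map PySem.Str.lower).contains lab)).map
        (fun lab => (PySem.List.index? (fields.map PySem.Str.lower) lab).getD 0))
      (fun x => x) false
    = (pvSeq fields pvL).map
        (fun lab => (PySem.List.index? (fields.map PySem.Str.lower) lab).getD 0) := by
  have hdrop : pvLabels.drop 1 = pvL := rfl
  apply PySem.List.sorted_eq_of_perm_of_pairwise_lt
  · apply List.Perm.map
    apply (List.perm_ext_iff_of_nodup (pvSeq_nodup fields pvL pvL_nodup)
      (by rw [hdrop]; exact pvL_nodup.filter _)).mpr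
    intro lab
    rw [pvSeq_mem fields pvL pvL_nodup lab, hdrop, List.mem_filter]
    simp
  · simpa using pvSeq_idx_pairwise fields pvL pvL_nodup

-- titled field at a label's first-occurrence index is the capitalized label
theorem pvB_title_at_idx (fields : List String) (lab : String) (hlab : lab ∈ pvL)
    (hm : lab ∈ fields.map PySem.Str.lower) :
    pyTitle (fields.getD ((PySem.List.index? (fields.map PySem.Str.lower) lab).getD 0) "")
      = capWordStr lab := by
  obtain ⟨k, hk⟩ := Option.isSome_iff_exists.1
    ((PySem.List.index?_isSome_iff (fields.map PySem.Str.lower) lab).2 hm)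
  obtain ⟨hklt, hkv, -⟩ := PySem.List.getElem_of_index?_eq_some hk
  rw [hk]
  simp only [Option.getD_some]
  have hklt' : k < fields.length := by simpa using hklt
  rw [List.getD_eq_getElem fields "" hklt']
  apply pvTitle_of_lower
  · rw [← hkv]; simp
  · exact pvLowerIsLower lab (pvL_sub lab hlab)

theorem verifyfields_eq (fields : List String) : verifyfields fields = verifyfields_alt fields := by
  unfold verifyfields verifyfields_alt
  simp only []
  rw [List.foldl_cons]
  rw [show (if ([] : List String).contains "Name" then ([] : List String) else [] ++ ["Name"]) = ["Name"] from rfl]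
  rw [pvFoldA fields ["Name"] pvL pvL_nodup (fun lab h => h) (by simp)
    (fun lab hlab => by
      simp only [List.mem_singleton]
      constructor
      · intro h; exact absurd h (pvCap_ne_name lab hlab)
      · intro h; exact absurd hlab h)]
  rw [pvB_sorted fields, List.map_map]
  simp only [List.singleton_append, List.cons.injEq, true_and]
  apply List.map_congr_left
  intro lab hlab
  have hm := (pvSeq_mem fields pvL pvL_nodup lab).1 hlab
  exact (pvB_title_at_idx fields lab hm.1 hm.2).symm

-- ===== VERDICT (by name: the statement is the Claim_ definition above) =====
theorem verifyfields_spec : Claim_equal_verifyfields := by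
  intro fields _
  show verifyfields fields = verifyfields_alt fields
  exact verifyfields_eq fields
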